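-- pv_equiv track=rewrite | github.com/junlabucsd/DoubleAdderArticle | colicycle/colicycle/decomposition.py | renaming_modelGW
-- ===== SOURCE A (Python) =====
-- def renaming_modelGW(name):
--     """Renaming variables. This function simply translates variable names
--     used in the code into Latex style variables usable in plots. These
--     rules are valide for the double adder model
--
--     Parameters
--     ----------
--     name : list of strings
--         list of names to translate
--
--
--     Returns
--     -------
--     name : list of strings
--         translated list of names
--     """
--     name = [x.replace('tau_g','$\\alpha$') if type(x)==str else x for x in name]
--     name = [x.replace('Lig2_fit','$\\Lambda_f$') if type(x)==str else x for x in name]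
--     name = [x.replace('Lb_fit','$\\Lambda_b$') if type(x)==str else x for x in name]
--     name = [x.replace('Lig_fit','$\\Lambda_i$') if type(x)==str else x for x in name]
--     name = [x.replace('DeltaLgi','$d\\Lambda_{if}$') if type(x)==str else x for x in name]
--     name = [x.replace('DeltaLigb','$d\\Lambda_{ib}$') if type(x)==str else x for x in name]
--     name = [x.replace('Tbg','$T_{ib}$') if type(x)==str else x for x in name]
--     name = [x.replace('Tg','$T_{if}$') if type(x)==str else x for x in name]
--     name = [x.replace('rLig','$R_{if}$') if type(x)==str else x for x in name]
--
--     return name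
-- ===== SOURCE B (Python) =====
-- _PAIRS = [
--     ('tau_g', '$\\alpha$'),
--     ('Lig2_fit', '$\\Lambda_f$'),
--     ('Lb_fit', '$\\Lambda_b$'),
--     ('Lig_fit', '$\\Lambda_i$'),
--     ('DeltaLgi', '$d\\Lambda_{if}$'),
--     ('DeltaLigb', '$d\\Lambda_{ib}$'),
--     ('Tbg', '$T_{ib}$'),
--     ('Tg', '$T_{if}$'),
--     ('rLig', '$R_{if}$'),
-- ]
--
-- def _translate(s, pairs):
--     # Recursive tokenization: split on the first pattern, emit its replacement
--     # verbatim (it is never rescanned -- no pattern occurs in or across any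
--     # replacement), and recurse with the remaining patterns on each piece only.
--     if not pairs:
--         return s
--     pat, rep = pairs[0]
--     return rep.join(_translate(piece, pairs[1:]) for piece in s.split(pat))
--
-- def renaming_modelGW(name):
--     return [_translate(x, _PAIRS) if type(x) == str else x for x in name]
-- ===== Notes on version B (the rewrite author's own statement) =====
-- stated objective: alternative
-- what changed: B recursively tokenizes each string: it splits on a pattern once, emits the replacement verbatim without ever rescanning it, and recurses with only the remaining patterns on the split pieces, whereas A rescans the whole list (and every emitted replacement) in nine full passes; correct because no pattern occurs inside or across any replacement text.
import Mathlib
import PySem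

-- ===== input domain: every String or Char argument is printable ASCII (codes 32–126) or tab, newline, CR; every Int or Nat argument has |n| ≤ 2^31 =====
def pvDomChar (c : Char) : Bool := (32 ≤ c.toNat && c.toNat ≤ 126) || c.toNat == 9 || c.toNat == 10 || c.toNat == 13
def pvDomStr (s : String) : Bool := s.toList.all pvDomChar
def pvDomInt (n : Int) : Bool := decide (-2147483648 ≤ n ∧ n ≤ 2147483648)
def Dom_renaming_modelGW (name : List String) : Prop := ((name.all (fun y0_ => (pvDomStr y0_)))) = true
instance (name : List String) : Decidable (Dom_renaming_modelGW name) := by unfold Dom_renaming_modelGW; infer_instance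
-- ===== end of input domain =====

-- B replaces A's nine sequential whole-list replace passes by a recursive tokenization:
-- split on each pattern once, emit its replacement verbatim (never rescanned), and
-- recurse with the remaining patterns on the pieces only; objective: alternative.

-- ===== PORT A =====
def renaming_modelGW (name : List String) : List String :=
  let name := name.map (fun x => PySem.Str.replace x "tau_g" "$\\alpha$")
  let name := name.map (fun x => PySem.Str.replace x "Lig2_fit" "$\\Lambda_f$")
  let name := name.map (fun x => PySem.Str.replace x "Lb_fit" "$\\Lambda_b$")
  let name := name.map (fun x => PySem.Str.replace x "Lig_fit" "$\\Lambda_i$")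
  let name := name.map (fun x => PySem.Str.replace x "DeltaLgi" "$d\\Lambda_{if}$")
  let name := name.map (fun x => PySem.Str.replace x "DeltaLigb" "$d\\Lambda_{ib}$")
  let name := name.map (fun x => PySem.Str.replace x "Tbg" "$T_{ib}$")
  let name := name.map (fun x => PySem.Str.replace x "Tg" "$T_{if}$")
  let name := name.map (fun x => PySem.Str.replace x "rLig" "$R_{if}$")
  name

-- ===== PORT B =====
def pvPairs : List (String × String) :=
  [("tau_g", "$\\alpha$"), ("Lig2_fit", "$\\Lambda_f$"), ("Lb_fit", "$\\Lambda_b$"),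
   ("Lig_fit", "$\\Lambda_i$"), ("DeltaLgi", "$d\\Lambda_{if}$"), ("DeltaLigb", "$d\\Lambda_{ib}$"),
   ("Tbg", "$T_{ib}$"), ("Tg", "$T_{if}$"), ("rLig", "$R_{if}$")]

-- Source B's _translate: s.split(pat) raises only for pat = ""; every pattern in pvPairs is a
-- nonempty literal, so Str.split? is always `some` here and the `.getD [s]` default is dead.
def pvTranslate : List (String × String) → String → String
  | [], s => s
  | (pat, rep) :: rest, s =>
      PySem.Str.join rep (((PySem.Str.split? s pat).getD [s]).map (pvTranslate rest))

def renaming_modelGW_alt (name : List String) : List String :=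
  name.map (pvTranslate pvPairs)

-- ===== PRECONDITION & SPEC =====
def Spec_renaming_modelGW (name : List String) (out : List String) : Prop := out = renaming_modelGW_alt name
instance (name : List String) (out : List String) : Decidable (Spec_renaming_modelGW name out) := by unfold Spec_renaming_modelGW; infer_instance

-- ===== CLAIM (what is proved, stated in full; the proofs are below) =====
def Claim_equal_renaming_modelGW : Prop := ∀ (name : List String), Dom_renaming_modelGW name → Spec_renaming_modelGW name (renaming_modelGW name)

-- ===== LEMMAS AND PROOFS =====

-- `noCrossB old rep = true` says: no nonempty suffix of `old` is a prefix of `rep` or vice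
-- versa, and no nonempty suffix of `rep` is a prefix of `old` or vice versa — hence an
-- occurrence of `old` can neither start inside an emitted `rep` block nor overlap its edges.
def noCrossB (old rep : List Char) : Bool :=
  (old.tails.all fun od => od.isEmpty || (!od.isPrefixOf rep && !rep.isPrefixOf od)) &&
  (rep.tails.all fun rr => rr.isEmpty || (!old.isPrefixOf rr && !rr.isPrefixOf old))

-- `goodB ps = true`: every pattern is nonempty and no later pattern crosses an earlier replacement.
def goodB : List (List Char × List Char) → Bool
  | [] => true
  | (p, r) :: rest => !p.isEmpty && rest.all (fun q => noCrossB q.1 r) && goodB rest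

-- the char-level fold that A performs per element
def foldRepl (ps : List (List Char × List Char)) (s : List Char) : List Char :=
  ps.foldl (fun s q => PySem.Chars.replace s q.1 q.2) s

theorem rgo_nil (old new acc : List Char) (f : Nat) :
    PySem.Chars.replace.go old new f [] acc = acc.reverse := by
  cases f <;> simp [PySem.Chars.replace.go]


theorem rgo_cons (old new acc t : List Char) (c : Char) (f : Nat) :
    PySem.Chars.replace.go old new (f+1) (c::t) acc =
    if old.isPrefixOf (c::t) then PySem.Chars.replace.go old new f (List.drop old.length (c::t)) (new.reverse ++ acc)
    else PySem.Chars.replace.go old new f t (c::acc) := by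
  rw [PySem.Chars.replace.go]

theorem sgo_zero (sep cur : List Char) (acc : List (List Char)) (l : List Char) :
    PySem.Chars.splitOn.go sep 0 l cur acc = ((cur.reverse ++ l) :: acc).reverse := by
  simp [PySem.Chars.splitOn.go]

theorem sgo_nil (sep cur : List Char) (acc : List (List Char)) (f : Nat) :
    PySem.Chars.splitOn.go sep (f+1) [] cur acc = (cur.reverse :: acc).reverse := by
  simp [PySem.Chars.splitOn.go]

theorem sgo_cons (sep cur t : List Char) (c : Char) (acc : List (List Char)) (f : Nat) :
    PySem.Chars.splitOn.go sep (f+1) (c::t) cur acc =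
    if sep.isPrefixOf (c::t) then PySem.Chars.splitOn.go sep f (List.drop sep.length (c::t)) [] (cur.reverse :: acc)
    else PySem.Chars.splitOn.go sep f t (c::cur) acc := by
  rw [PySem.Chars.splitOn.go]

theorem rgo_acc (old new : List Char) (f : Nat) (l acc : List Char) :
    PySem.Chars.replace.go old new f l acc = acc.reverse ++ PySem.Chars.replace.go old new f l [] := by
  induction f generalizing l acc with
  | zero => simp [PySem.Chars.replace.go]
  | succ f IH =>
    cases l with
    | nil => simp [rgo_nil]
    | cons c t =>
      rw [PySem.Chars.replace.go, PySem.Chars.replace.go]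
      by_cases h : List.isPrefixOf old (c :: t) = true
      · simp only [h, if_true]
        rw [IH _ (new.reverse ++ acc), IH _ (new.reverse ++ [])]
        simp
      · simp only [h, if_false]  -- placeholder; fixed below if needed
        rw [IH _ (c :: acc), IH _ (c :: ([] : List Char))]
        simp

theorem rgo_fuel (old new : List Char) (hold : old ≠ []) (f1 f2 : Nat) (l acc : List Char)
    (h1 : l.length ≤ f1) (h2 : l.length ≤ f2) :
    PySem.Chars.replace.go old new f1 l acc = PySem.Chars.replace.go old new f2 l acc := by
  induction f1 generalizing f2 l acc with
  | zero =>
    have : l = [] := by cases l <;> simp_all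
    subst this; simp [rgo_nil]
  | succ f1 IH =>
    cases l with
    | nil => simp [rgo_nil]
    | cons c t =>
      cases f2 with
      | zero => simp at h2
      | succ f2 =>
        rw [PySem.Chars.replace.go, PySem.Chars.replace.go]
        by_cases h : List.isPrefixOf old (c :: t) = true
        · simp only [h, if_true]
          have hle : old.length ≤ (c :: t).length := (List.isPrefixOf_iff_prefix.mp h).length_le
          have hone : 1 ≤ old.length := by
            cases old with | nil => exact absurd rfl hold | cons a b => simp
          have hlen : (List.drop old.length (c :: t)).length ≤ f1 := by
            simp only [List.length_drop, List.length_cons] at h1 ⊢; omega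
          have hlen2 : (List.drop old.length (c :: t)).length ≤ f2 := by
            simp only [List.length_drop, List.length_cons] at h2 ⊢; omega
          exact IH f2 _ _ hlen hlen2
        · simp only [h, if_false]
          exact IH f2 t (c :: acc) (by simp at h1 ⊢; omega) (by simp at h2 ⊢; omega)

theorem replace_eq_go (old new s : List Char) (hold : old ≠ []) :
    PySem.Chars.replace s old new = PySem.Chars.replace.go old new s.length s [] := by
  have : old.isEmpty = false := by cases old <;> simp_all
  rw [PySem.Chars.replace, this]; simp

theorem replace_nil (old new : List Char) (hold : old ≠ []) :
    PySem.Chars.replace [] old new = [] := by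
  rw [replace_eq_go _ _ _ hold]; simp [rgo_nil]

-- crossing the left boundary: processing a ++ rest where no occurrence of old straddles
theorem rgo_prefix_skip (old new : List Char) (hold : old ≠ [])
    (rest : List Char) :
    ∀ (f : Nat) (a acc : List Char),
    (∀ ra : List Char, ra <:+ a → old <+: (ra ++ rest) → old <+: ra) →
    a.length + rest.length ≤ f →
    PySem.Chars.replace.go old new f (a ++ rest) acc =
      PySem.Chars.replace.go old new rest.length rest ((PySem.Chars.replace a old new).reverse ++ acc) := by
  intro f
  induction f with
  | zero =>
    intro a acc hcross hle
    have ha : a = [] := by cases a <;> simp_all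
    have hr : rest = [] := by cases rest <;> simp_all
    subst ha; subst hr
    simp [rgo_nil, replace_nil _ _ hold]
  | succ f IH =>
    intro a acc hcross hle
    cases a with
    | nil =>
      simp only [List.nil_append]
      rw [rgo_fuel old new hold (f+1) rest.length rest acc (by simpa using hle) le_rfl]
      simp [replace_nil _ _ hold]
    | cons c t =>
      rw [show ((c :: t) ++ rest) = c :: (t ++ rest) by simp]
      rw [PySem.Chars.replace.go]
      by_cases h : List.isPrefixOf old (c :: (t ++ rest)) = true
      · simp only [h, if_true]
        have hpre : old <+: (c :: t) := by
          apply hcross (c :: t) (List.suffix_refl _)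
          simpa using List.isPrefixOf_iff_prefix.mp h
        have hle' : old.length ≤ (c :: t).length := hpre.length_le
        have hdrop : List.drop old.length (c :: (t ++ rest)) =
            List.drop old.length (c :: t) ++ rest := by
          rw [show (c :: (t ++ rest)) = (c :: t) ++ rest by simp]
          exact List.drop_append_of_le_length hle'
        rw [hdrop]
        have hone : 1 ≤ old.length := by
          cases old with | nil => exact absurd rfl hold | cons a b => simp
        have := IH (List.drop old.length (c :: t)) (new.reverse ++ acc)
          (fun ra hra hp => hcross ra (hra.trans (List.drop_suffix _ _)) hp)
          (by simp only [List.length_drop, List.length_cons, List.length_append] at hle ⊢; omega)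
        rw [this]
        -- rewrite RHS: replace (c::t) = new ++ replace (drop old.length (c::t))
        have hrepl : PySem.Chars.replace (c :: t) old new =
            new ++ PySem.Chars.replace (List.drop old.length (c :: t)) old new := by
          rw [replace_eq_go _ _ _ hold, replace_eq_go _ _ _ hold]
          rw [show (c :: t).length = t.length + 1 by simp]
          rw [PySem.Chars.replace.go]
          have h2 : List.isPrefixOf old (c :: t) = true :=
            List.isPrefixOf_iff_prefix.mpr hpre
          simp only [h2, if_true]
          rw [rgo_acc]
          rw [rgo_fuel old new hold t.length (List.drop old.length (c :: t)).length
            (List.drop old.length (c :: t)) [] (by simp [List.length_drop]; omega) le_rfl]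
          simp
        rw [hrepl]
        simp [List.append_assoc]
      · simp only [h, if_false]
        have hnp : ¬ old <+: (c :: t) := by
          intro hp
          exact h (List.isPrefixOf_iff_prefix.mpr (by
            have : (c :: t) <+: (c :: t) ++ rest := List.prefix_append _ _
            simpa using hp.trans this))
        have := IH t (c :: acc)
          (fun ra hra hp => hcross ra (hra.trans (by
            exact List.suffix_cons c t)) hp)
          (by simp at hle ⊢; omega)
        rw [this]
        have hrepl : PySem.Chars.replace (c :: t) old new =
            c :: PySem.Chars.replace t old new := by
          rw [replace_eq_go _ _ _ hold, replace_eq_go _ _ _ hold]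
          rw [show (c :: t).length = t.length + 1 by simp]
          rw [PySem.Chars.replace.go]
          have h2 : List.isPrefixOf old (c :: t) = false := by
            rw [Bool.eq_false_iff]
            intro hc; exact hnp (List.isPrefixOf_iff_prefix.mp hc)
          simp only [h2, Bool.false_eq_true, if_false]
          rw [rgo_acc old new t.length t [c]]
          simp
        rw [hrepl]
        simp

-- skipping an emitted block: no occurrence of old starts inside rep (nor crosses its right edge)
theorem rgo_block_skip (old new : List Char) (hold : old ≠ [])
    (b : List Char) :
    ∀ (rep : List Char) (f : Nat) (acc : List Char),
    (∀ rr : List Char, rr <:+ rep → rr ≠ [] → ¬ old <+: (rr ++ b)) →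
    rep.length + b.length ≤ f →
    PySem.Chars.replace.go old new f (rep ++ b) acc =
      PySem.Chars.replace.go old new b.length b (rep.reverse ++ acc) := by
  intro rep
  induction rep with
  | nil =>
    intro f acc hno hle
    simp only [List.nil_append, List.reverse_nil]
    exact rgo_fuel old new hold f b.length b acc (by simpa using hle) le_rfl
  | cons c t IH =>
    intro f acc hno hle
    cases f with
    | zero => simp at hle
    | succ f =>
      rw [show ((c :: t) ++ b) = c :: (t ++ b) by simp]
      rw [PySem.Chars.replace.go]
      have h : List.isPrefixOf old (c :: (t ++ b)) = false := by
        rw [Bool.eq_false_iff]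
        intro hc
        exact hno (c :: t) (List.suffix_refl _) (by simp)
          (by simpa using List.isPrefixOf_iff_prefix.mp hc)
      simp only [h, if_false]
      have := IH f (c :: acc)
        (fun rr hrr hne => hno rr (hrr.trans (List.suffix_cons c t)) hne)
        (by simp at hle ⊢; omega)
      rw [this]
      simp

-- join to a last piece extended on the right
theorem join_last_append (sep : List Char) (xs : List (List Char)) (u v : List Char) :
    PySem.Chars.join sep (xs ++ [u ++ v]) = PySem.Chars.join sep (xs ++ [u]) ++ v := by
  induction xs with
  | nil => simp [PySem.Chars.join_singleton]
  | cons w xs IH =>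
    cases xs with
    | nil =>
      rw [show ([w] ++ [u ++ v]) = (w :: [u ++ v] : List (List Char)) by simp,
          show ([w] ++ [u]) = (w :: [u] : List (List Char)) by simp]
      rw [PySem.Chars.join_cons_cons, PySem.Chars.join_cons_cons]
      simp [PySem.Chars.join_singleton]
    | cons y ys =>
      rw [show ((w :: y :: ys) ++ [u ++ v]) = w :: ((y :: ys) ++ [u ++ v]) by simp,
          show ((w :: y :: ys) ++ [u]) = w :: ((y :: ys) ++ [u]) by simp]
      have h1 : ∃ q qs, (y :: ys) ++ [u ++ v] = q :: qs := ⟨y, ys ++ [u ++ v], by simp⟩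
      rw [show (w :: ((y :: ys) ++ [u ++ v])) = w :: y :: (ys ++ [u ++ v]) by simp,
          show (w :: ((y :: ys) ++ [u])) = w :: y :: (ys ++ [u]) by simp]
      rw [PySem.Chars.join_cons_cons, PySem.Chars.join_cons_cons]
      have := IH
      rw [show ((y :: ys) ++ [u ++ v]) = y :: (ys ++ [u ++ v]) by simp,
          show ((y :: ys) ++ [u]) = y :: (ys ++ [u]) by simp] at IH
      rw [IH]
      simp

-- join of a nonempty list with one more piece appended
theorem join_snoc (sep : List Char) (xs : List (List Char)) (u v : List Char) :
    PySem.Chars.join sep ((xs ++ [u]) ++ [v]) = PySem.Chars.join sep (xs ++ [u]) ++ sep ++ v := by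
  induction xs with
  | nil => simp [PySem.Chars.join_cons_cons, PySem.Chars.join_singleton]
  | cons w xs IH =>
    cases xs with
    | nil =>
      simp only [List.cons_append, List.nil_append]
      rw [PySem.Chars.join_cons_cons, PySem.Chars.join_cons_cons, PySem.Chars.join_cons_cons]
      simp [PySem.Chars.join_singleton]
    | cons y ys =>
      simp only [List.cons_append]
      rw [PySem.Chars.join_cons_cons, PySem.Chars.join_cons_cons]
      simp only [List.cons_append] at IH
      rw [IH]
      simp

-- splitOn.go synchronized with replace.go: joining the split with `new` IS replace
theorem sgo_rgo (old new : List Char) :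
    ∀ (f : Nat) (l cur : List Char) (acc : List (List Char)) (accR : List Char),
    accR.reverse = PySem.Chars.join new (acc.reverse ++ [cur.reverse]) →
    PySem.Chars.join new (PySem.Chars.splitOn.go old f l cur acc) =
      PySem.Chars.replace.go old new f l accR := by
  intro f
  induction f with
  | zero =>
    intro l cur acc accR hinv
    rw [sgo_zero, PySem.Chars.replace.go]
    rw [List.reverse_cons, join_last_append, ← hinv]
  | succ f IH =>
    intro l cur acc accR hinv
    cases l with
    | nil =>
      rw [sgo_nil, rgo_nil]
      rw [List.reverse_cons, ← hinv]
    | cons c t =>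
      rw [sgo_cons, rgo_cons]
      by_cases h : List.isPrefixOf old (c :: t) = true
      · simp only [h, if_true]
        apply IH
        simp only [List.reverse_append, List.reverse_reverse, List.reverse_cons, List.reverse_nil]
        rw [join_snoc, ← hinv]
        simp
      · simp only [h, if_false]
        apply IH
        simp only [List.reverse_cons]
        rw [join_last_append, ← hinv]

-- joining the pieces of splitOn with `new` is exactly Python's replace
theorem join_splitOn (old new s : List Char) (hold : old ≠ []) :
    PySem.Chars.join new (PySem.Chars.splitOn s old) = PySem.Chars.replace s old new := by
  rw [PySem.Chars.splitOn, replace_eq_go _ _ _ hold]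
  rw [sgo_rgo old new (s.length + 1) s [] [] []
    (by simp [PySem.Chars.join_singleton])]
  exact rgo_fuel old new hold (s.length + 1) s.length s [] (by simp) le_rfl

theorem nocross_prop (old rep : List Char) (h : noCrossB old rep = true) :
    (∀ od, od <:+ old → od ≠ [] → ¬ od <+: rep ∧ ¬ rep <+: od) ∧
    (∀ rr, rr <:+ rep → rr ≠ [] → ¬ old <+: rr ∧ ¬ rr <+: old) := by
  simp only [noCrossB, Bool.and_eq_true, List.all_eq_true] at h
  obtain ⟨h1, h2⟩ := h
  constructor
  · intro od hod hne
    have := h1 od ((List.mem_tails _ _).mpr hod)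
    rcases od with _ | ⟨a, b⟩
    · exact absurd rfl hne
    · simp only [List.isEmpty_cons, Bool.false_or, Bool.and_eq_true, Bool.not_eq_true'] at this
      exact ⟨fun hc => by simp [List.isPrefixOf_iff_prefix.mpr hc] at this,
             fun hc => by simp [List.isPrefixOf_iff_prefix.mpr hc] at this⟩
  · intro rr hrr hne
    have := h2 rr ((List.mem_tails _ _).mpr hrr)
    rcases rr with _ | ⟨a, b⟩
    · exact absurd rfl hne
    · simp only [List.isEmpty_cons, Bool.false_or, Bool.and_eq_true, Bool.not_eq_true'] at this
      exact ⟨fun hc => by simp [List.isPrefixOf_iff_prefix.mpr hc] at this,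
             fun hc => by simp [List.isPrefixOf_iff_prefix.mpr hc] at this⟩

-- no occurrence of old can cross from a piece into the following rep-block
theorem hcross_of_nocross (old rep : List Char) (h : noCrossB old rep = true) :
    ∀ (ra z : List Char), old <+: (ra ++ (rep ++ z)) → old <+: ra := by
  intro ra z hp
  obtain ⟨hodr, _⟩ := nocross_prop old rep h
  by_cases hlen : old.length ≤ ra.length
  · exact List.prefix_of_prefix_length_le hp (List.prefix_append _ _) hlen
  · exfalso
    push_neg at hlen
    have hra : ra <+: old :=
      List.prefix_of_prefix_length_le (List.prefix_append _ _) hp (le_of_lt hlen)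
    obtain ⟨u, hu⟩ := hra
    have hune : u ≠ [] := by
      intro hc; subst hc
      have := congrArg List.length hu
      simp at this; omega
    have husuf : u <:+ old := ⟨ra, hu⟩
    have hup : u <+: (rep ++ z) := by
      rw [← hu] at hp
      exact (List.prefix_append_right_inj ra).mp hp
    by_cases hul : u.length ≤ rep.length
    · exact (hodr u husuf hune).1
        (List.prefix_of_prefix_length_le hup (List.prefix_append _ _) hul)
    · push_neg at hul
      exact (hodr u husuf hune).2
        (List.prefix_of_prefix_length_le (List.prefix_append _ _) hup (le_of_lt hul))

-- no occurrence of old starts inside a rep-block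
theorem hno_of_nocross (old rep : List Char) (h : noCrossB old rep = true) :
    ∀ (rr b : List Char), rr <:+ rep → rr ≠ [] → ¬ old <+: (rr ++ b) := by
  intro rr b hrr hne hp
  obtain ⟨_, hrrp⟩ := nocross_prop old rep h
  by_cases hlen : old.length ≤ rr.length
  · exact (hrrp rr hrr hne).1
      (List.prefix_of_prefix_length_le hp (List.prefix_append _ _) hlen)
  · push_neg at hlen
    exact (hrrp rr hrr hne).2
      (List.prefix_of_prefix_length_le (List.prefix_append _ _) hp (le_of_lt hlen))

-- replace distributes over a rep-joined list when old cannot touch the rep blocks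
theorem replace_join (old new rep : List Char) (hold : old ≠ [])
    (h : noCrossB old rep = true) :
    ∀ xs : List (List Char),
    PySem.Chars.replace (PySem.Chars.join rep xs) old new =
      PySem.Chars.join rep (xs.map (fun x => PySem.Chars.replace x old new)) := by
  intro xs
  induction xs with
  | nil => simp [PySem.Chars.join_nil, replace_nil _ _ hold]
  | cons x xs IH =>
    cases xs with
    | nil => simp [PySem.Chars.join_singleton]
    | cons y t =>
      rw [PySem.Chars.join_cons_cons]
      rw [List.map_cons, List.map_cons, PySem.Chars.join_cons_cons]
      rw [replace_eq_go _ _ _ hold]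
      rw [List.append_assoc]
      rw [rgo_prefix_skip old new hold (rep ++ PySem.Chars.join rep (y :: t))
        _ x []
        (fun ra _ hp => hcross_of_nocross old rep h ra _ hp)
        (by simp)]
      rw [rgo_block_skip old new hold (PySem.Chars.join rep (y :: t))
        rep _ _
        (fun rr hrr hne => hno_of_nocross old rep h rr _ hrr hne)
        (by simp)]
      rw [rgo_acc]
      rw [← replace_eq_go _ _ _ hold]
      rw [IH]
      simp [List.append_assoc]

-- iterated: a whole fold of replaces distributes over a rep-joined list
theorem foldRepl_join (rep : List Char) (ps : List (List Char × List Char))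
    (hne : ∀ q ∈ ps, q.1 ≠ []) (hnc : ∀ q ∈ ps, noCrossB q.1 rep = true) :
    ∀ xs : List (List Char),
    foldRepl ps (PySem.Chars.join rep xs) = PySem.Chars.join rep (xs.map (foldRepl ps)) := by
  induction ps with
  | nil => intro xs; unfold foldRepl; simp
  | cons q ps IH =>
    intro xs
    obtain ⟨p, r⟩ := q
    rw [show foldRepl ((p, r) :: ps) (PySem.Chars.join rep xs) =
        foldRepl ps (PySem.Chars.replace (PySem.Chars.join rep xs) p r) from rfl]
    rw [replace_join p r rep (hne (p, r) (by simp)) (hnc (p, r) (by simp))]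
    rw [IH (fun q hq => hne q (by simp [hq])) (fun q hq => hnc q (by simp [hq]))]
    rw [List.map_map]
    rfl

theorem goodB_nonempty (ps : List (List Char × List Char)) (h : goodB ps = true) :
    ∀ q ∈ ps, q.1 ≠ [] := by
  induction ps with
  | nil => simp
  | cons q ps IH =>
    obtain ⟨p, r⟩ := q
    simp only [goodB, Bool.and_eq_true] at h
    intro q hq
    rcases List.mem_cons.mp hq with h1 | h1
    · subst h1
      have := h.1.1
      simp only [Bool.not_eq_true'] at this
      intro hc
      rw [show (p, r).1 = p from rfl] at hc
      simp [hc] at this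
    · exact IH h.2 q h1

-- the per-string step: B's one tokenization level absorbs the head replace of A's fold
theorem tokenize_cons_eq (p r : List Char) (rest : List (List Char × List Char))
    (h : goodB ((p, r) :: rest) = true) (s : List Char) :
    PySem.Chars.join r ((PySem.Chars.splitOn s p).map (foldRepl rest)) =
      foldRepl ((p, r) :: rest) s := by
  simp only [goodB, Bool.and_eq_true, List.all_eq_true] at h
  have hp : p ≠ [] := by
    have := h.1.1
    simp only [Bool.not_eq_true'] at this
    intro hc; simp [hc] at this
  rw [← foldRepl_join r rest (goodB_nonempty rest h.2) (fun q hq => h.1.2 q hq)]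
  rw [join_splitOn p r s hp]
  rfl

-- bridge: pvTranslate on Strings is A's char-level fold of replaces
theorem pvTranslate_eq (ps : List (String × String))
    (h : goodB (ps.map (fun q => (q.1.toList, q.2.toList))) = true) (s : String) :
    pvTranslate ps s =
      String.ofList (foldRepl (ps.map (fun q => (q.1.toList, q.2.toList))) s.toList) := by
  induction ps generalizing s with
  | nil => simp [pvTranslate, foldRepl]
  | cons q rest IH =>
    obtain ⟨p, r⟩ := q
    have h' := h
    simp only [List.map_cons, goodB, Bool.and_eq_true] at h'
    have hp : p.toList ≠ [] := by
      have := h'.1.1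
      simp only [Bool.not_eq_true'] at this
      intro hc; simp [hc] at this
    rw [show pvTranslate ((p, r) :: rest) s =
      PySem.Str.join r (((PySem.Str.split? s p).getD [s]).map (pvTranslate rest)) from rfl]
    have hsplit : PySem.Str.split? s p =
        some ((PySem.Chars.splitOn s.toList p.toList).map String.ofList) := by
      have hne : p.toList.isEmpty = false := by
        cases hpt : p.toList with
        | nil => exact absurd hpt hp
        | cons a b => simp
      simp [PySem.Str.split?, PySem.Chars.split?, hne]
    rw [hsplit]
    simp only [Option.getD_some, List.map_map]
    have hmap : ((PySem.Chars.splitOn s.toList p.toList).map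
          (pvTranslate rest ∘ String.ofList)) =
        (PySem.Chars.splitOn s.toList p.toList).map
          (fun x => String.ofList (foldRepl (rest.map (fun q => (q.1.toList, q.2.toList))) x)) := by
      apply List.map_congr_left
      intro x _
      simp only [Function.comp_apply]
      rw [IH h'.2]
      simp
    rw [hmap]
    rw [show PySem.Str.join r = fun parts => String.ofList
      (PySem.Chars.join r.toList (parts.map String.toList)) from rfl]
    simp only [List.map_map]
    have hmap2 : ((PySem.Chars.splitOn s.toList p.toList).map
          (String.toList ∘ fun x => String.ofList (foldRepl (rest.map (fun q => (q.1.toList, q.2.toList))) x))) =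
        ((PySem.Chars.splitOn s.toList p.toList).map
          (foldRepl (rest.map (fun q => (q.1.toList, q.2.toList))))) := by
      apply List.map_congr_left
      intro x _
      simp
    rw [hmap2]
    rw [tokenize_cons_eq p.toList r.toList (rest.map (fun q => (q.1.toList, q.2.toList)))
      (by simpa using h) s.toList]
    simp [List.map_cons]

-- the nine patterns/replacements satisfy the crossing-freedom conditions
theorem pvPairs_good : goodB (pvPairs.map (fun q => (q.1.toList, q.2.toList))) = true := by
  decide

-- per element, A's nine chained replaces equal B's tokenization
theorem nine_eq (x : String) :
    PySem.Str.replace (PySem.Str.replace (PySem.Str.replace (PySem.Str.replace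
      (PySem.Str.replace (PySem.Str.replace (PySem.Str.replace (PySem.Str.replace
      (PySem.Str.replace x "tau_g" "$\\alpha$") "Lig2_fit" "$\\Lambda_f$")
      "Lb_fit" "$\\Lambda_b$") "Lig_fit" "$\\Lambda_i$") "DeltaLgi" "$d\\Lambda_{if}$")
      "DeltaLigb" "$d\\Lambda_{ib}$") "Tbg" "$T_{ib}$") "Tg" "$T_{if}$") "rLig" "$R_{if}$" =
    pvTranslate pvPairs x := by
  rw [pvTranslate_eq pvPairs pvPairs_good x]
  simp [foldRepl, pvPairs, PySem.Str.replace]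

-- ===== VERDICT (by name: the statement is the Claim_ definition above) =====
theorem renaming_modelGW_spec : Claim_equal_renaming_modelGW := by
  intro name _
  unfold Spec_renaming_modelGW renaming_modelGW renaming_modelGW_alt
  simp only [List.map_map]
  apply List.map_congr_left
  intro x _
  simp only [Function.comp_apply]
  exact nine_eq x
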